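-- pv_equiv track=rewrite | github.com/TalkingFox/AdventOfCode | AOC2024/22/part_2.py | generate_price_sequences
-- ===== SOURCE A (Python) =====
-- from typing import Dict, List
--
-- def mix(value: int, secret: int) -> int:
--     return value ^ secret
--
-- def prune(secret: int) -> int:
--     return secret % 16_777_216
--
-- def generate_next_secret(secret: int) -> int:
--     product = secret * 64
--     secret = mix(product, secret)
--     secret = prune(secret)
--
--     quotient = secret // 32
--     secret = mix(quotient, secret)
--     secret = prune(secret)
--
--     product = secret * 2048
--     secret = mix(product, secret)
--     secret = prune(secret)
--     return secret
--
-- def generate_price_sequences(secret: int, iterations: int) -> Dict[str, int]: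
--     last_price = secret % 10
--     prices_by_sequence = {}
--     current_sequence: List[int] = []
--     for i in range(iterations):
--         secret = generate_next_secret(secret)
--         price = secret % 10
--         change = price - last_price
--         if len(current_sequence) == 4:
--             current_sequence.pop(0)
--             current_sequence.append(change)
--             key = str(current_sequence)
--             if key not in prices_by_sequence:
--                 prices_by_sequence[key] = price
--         else:
--             current_sequence.append(change)
--         last_price = price
--     return prices_by_sequence
-- ===== SOURCE B (Python) =====
-- # B: two-pass decomposition — first generate all prices, derive the change list,
-- # then record each 4-change window's first price by slicing (no sliding pop/append state).
-- from typing import Dict, List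
--
--
-- def mix(value: int, secret: int) -> int:
--     return value ^ secret
--
--
-- def prune(secret: int) -> int:
--     return secret % 16_777_216
--
--
-- def generate_next_secret(secret: int) -> int:
--     product = secret * 64
--     secret = mix(product, secret)
--     secret = prune(secret)
--
--     quotient = secret // 32
--     secret = mix(quotient, secret)
--     secret = prune(secret)
--
--     product = secret * 2048
--     secret = mix(product, secret)
--     secret = prune(secret)
--     return secret
--
--
-- def generate_price_sequences(secret: int, iterations: int) -> Dict[str, int]:
--     prices: List[int] = []
--     s = secret
--     for _ in range(iterations):
--         s = generate_next_secret(s)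
--         prices.append(s % 10)
--     changes = [p - q for p, q in zip(prices, [secret % 10] + prices[:-1])]
--     result: Dict[str, int] = {}
--     for i, price in enumerate(prices):
--         if i >= 4:
--             key = str(changes[i - 3:i + 1])
--             if key not in result:
--                 result[key] = price
--     return result
-- ===== Notes on version B (the rewrite author's own statement) =====
-- stated objective: alternative
-- what changed: A maintains a sliding 4-change window, last price and dict inside one stateful generation loop; B decomposes into two passes: generate the full price list, derive the change list by zipping it with its shifted self, then build the dict in a separate enumerate pass keyed by slices changes[i-3:i+1] for i >= 4 (reproducing A's skip of the first window).
import Mathlib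
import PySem

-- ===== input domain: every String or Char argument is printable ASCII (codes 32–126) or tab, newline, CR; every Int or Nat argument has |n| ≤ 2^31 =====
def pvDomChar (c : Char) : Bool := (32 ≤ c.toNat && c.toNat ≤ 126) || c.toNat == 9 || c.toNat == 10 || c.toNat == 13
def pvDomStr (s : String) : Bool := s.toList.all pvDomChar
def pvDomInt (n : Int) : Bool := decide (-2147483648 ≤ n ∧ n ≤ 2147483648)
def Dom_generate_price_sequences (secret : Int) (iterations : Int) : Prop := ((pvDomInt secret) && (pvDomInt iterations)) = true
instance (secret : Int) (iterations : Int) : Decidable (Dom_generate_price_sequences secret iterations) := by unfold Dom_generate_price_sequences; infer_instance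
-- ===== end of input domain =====

-- B re-decomposes A's single stateful loop into two passes (generate all prices, then
-- record each 4-change window by slicing a precomputed change list); same return value.

-- ===== PORT A =====
-- same-module helpers (shared by both programs in Python)
def mix (value : Int) (secret : Int) : Int := PySem.Int.bxor value secret

def prune (secret : Int) : Int := PySem.Int.mod secret 16777216

def generate_next_secret (secret : Int) : Int :=
  let product := secret * 64
  let s1 := prune (mix product secret)
  let quotient := PySem.Int.floordiv s1 32
  let s2 := prune (mix quotient s1)
  let product2 := s2 * 2048
  prune (mix product2 s2)

-- str(l) for a Python list of ints, e.g. "[1, -2, 3]" (exact port of the built-in)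
def pyStrIntList (l : List Int) : String :=
  "[" ++ PySem.Str.join ", " (l.map PySem.Int.toStr) ++ "]"

-- loop body of A; state = (secret, last_price, prices_by_sequence, current_sequence)
def pvAStep (st : Int × Int × PySem.Dict String Int × List Int) (_i : Int) :
    Int × Int × PySem.Dict String Int × List Int :=
  let secret := generate_next_secret st.1
  let price := PySem.Int.mod secret 10
  let change := price - st.2.1
  let d := st.2.2.1
  let seq := st.2.2.2
  if seq.length = 4 then
    match PySem.List.pop? seq 0 with
    | some (_, rest) =>
        let seq' := rest ++ [change]
        let key := pyStrIntList seq'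
        (secret, price, if d.contains key then d else d.insert key price, seq')
    | none => (secret, price, d, seq)   -- unreachable: seq has length 4
  else (secret, price, d, seq ++ [change])

def generate_price_sequences (secret : Int) (iterations : Int) : List (String × Int) :=
  ((PySem.List.pyRange 0 iterations).foldl pvAStep
    (secret, PySem.Int.mod secret 10, PySem.Dict.empty, ([] : List Int))).2.2.1.items

-- ===== PORT B =====
-- first pass: run the generator, collecting every price (secret % 10)
def pvBPrices (secret : Int) (iterations : Int) : Int × List Int :=
  (PySem.List.pyRange 0 iterations).foldl
    (fun st _ =>
      let s := generate_next_secret st.1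
      (s, st.2 ++ [PySem.Int.mod s 10]))
    (secret, ([] : List Int))

-- second pass body: for (i, price), record changes[i-3:i+1] ↦ price once i ≥ 4
def pvBRecord (changes : List Int) (d : PySem.Dict String Int) (ip : Int × Int) :
    PySem.Dict String Int :=
  if 4 ≤ ip.1 then
    let key := pyStrIntList (PySem.List.slice changes (some (ip.1 - 3)) (some (ip.1 + 1)))
    if d.contains key then d else d.insert key ip.2
  else d

def generate_price_sequences_alt (secret : Int) (iterations : Int) : List (String × Int) :=
  let prices := (pvBPrices secret iterations).2
  let changes := (prices.zip (PySem.Int.mod secret 10 :: PySem.List.slice prices none (some (-1)))).map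
    (fun pq => pq.1 - pq.2)
  ((PySem.List.enumerate prices).foldl (pvBRecord changes) PySem.Dict.empty).items

-- ===== PRECONDITION & SPEC =====
def Spec_generate_price_sequences (secret : Int) (iterations : Int) (out : List (String × Int)) : Prop := out = generate_price_sequences_alt secret iterations
instance (secret : Int) (iterations : Int) (out : List (String × Int)) : Decidable (Spec_generate_price_sequences secret iterations out) := by unfold Spec_generate_price_sequences; infer_instance

-- ===== CLAIM (what is proved, stated in full; the proofs are below) =====
def Claim_equal_generate_price_sequences : Prop := ∀ (secret : Int) (iterations : Int), Dom_generate_price_sequences secret iterations → Spec_generate_price_sequences secret iterations (generate_price_sequences secret iterations)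

-- ===== LEMMAS AND PROOFS =====

-- the secret after k generations
def pvS (secret : Int) : Nat → Int
  | 0 => secret
  | k + 1 => generate_next_secret (pvS secret k)

-- the price produced at iteration k (0-based)
def pvP (secret : Int) (k : Nat) : Int := PySem.Int.mod (pvS secret (k + 1)) 10

-- the previous price as seen at iteration k
def pvLast (secret : Int) : Nat → Int
  | 0 => PySem.Int.mod secret 10
  | j + 1 => pvP secret j

-- the change recorded at iteration k
def pvC (secret : Int) (k : Nat) : Int := pvP secret k - pvLast secret k

-- A's sliding window after n iterations
def pvW (secret : Int) (n : Nat) : List Int :=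
  if 4 ≤ n then
    [pvC secret (n - 4), pvC secret (n - 3), pvC secret (n - 2), pvC secret (n - 1)]
  else (List.range n).map (pvC secret)

-- the common dict-building step, indexed by the iteration number
def pvStep (secret : Int) (d : PySem.Dict String Int) (k : Nat) : PySem.Dict String Int :=
  if 4 ≤ k then
    let key := pyStrIntList [pvC secret (k - 3), pvC secret (k - 2), pvC secret (k - 1), pvC secret k]
    if d.contains key then d else d.insert key (pvP secret k)
  else d

-- the dict after n iterations
def pvD (secret : Int) (n : Nat) : PySem.Dict String Int :=
  (List.range n).foldl (pvStep secret) PySem.Dict.empty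

lemma pvD_succ (secret : Int) (n : Nat) :
    pvD secret (n + 1) = pvStep secret (pvD secret n) n := by
  unfold pvD
  rw [List.range_succ, List.foldl_append]
  rfl

lemma pvA_inv (secret : Int) (n : Nat) :
    (PySem.List.pyRange 0 (n : Int)).foldl pvAStep
      (secret, PySem.Int.mod secret 10, PySem.Dict.empty, ([] : List Int))
      = (pvS secret n, pvLast secret n, pvD secret n, pvW secret n) := by
  induction n with
  | zero => simp [PySem.List.pyRange_one_eq_nil le_rfl, pvS, pvLast, pvD, pvW]
  | succ n ih =>
    have h0 : (0 : Int) ≤ (n : Int) := by omega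
    rw [show ((n + 1 : Nat) : Int) = (n : Int) + 1 by push_cast; ring,
      PySem.List.pyRange_one_succ_right h0, List.foldl_append, ih]
    show pvAStep (pvS secret n, pvLast secret n, pvD secret n, pvW secret n) (n : Int) = _
    by_cases h4 : 4 ≤ n
    · have hW : pvW secret n = pvC secret (n - 4) ::
          [pvC secret (n - 3), pvC secret (n - 2), pvC secret (n - 1)] := by
        simp [pvW, h4]
      have e1 : n + 1 - 4 = n - 3 := by omega
      have e2 : n + 1 - 3 = n - 2 := by omega
      have e3 : n + 1 - 2 = n - 1 := by omega
      have e4 : n + 1 - 1 = n := by omega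
      simp only [pvAStep, hW, List.length_cons, List.length_nil,
        PySem.List.pop?_zero_cons]
      rw [pvD_succ]
      simp only [pvStep, if_pos h4, pvW, if_pos (show 4 ≤ n + 1 by omega), e1, e2, e3, e4,
        pvLast, pvC]
      rfl
    · have hW : pvW secret n = (List.range n).map (pvC secret) := by
        simp [pvW, h4]
      have hlen : ((List.range n).map (pvC secret)).length ≠ 4 := by
        simpa using (by omega : n ≠ 4)
      have hW' : pvW secret (n + 1) = (List.range n).map (pvC secret) ++ [pvC secret n] := by
        rcases Nat.lt_or_ge n 3 with h3 | h3
        · rw [pvW, if_neg (by omega), List.range_succ, List.map_append]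
          simp
        · have hn : n = 3 := by omega
          subst hn
          simp [pvW, List.range_succ]
      simp only [pvAStep, hW, if_neg hlen]
      rw [pvD_succ]
      simp only [pvStep, if_neg h4, hW', pvLast, pvC]
      rfl

lemma pvB_prices (secret : Int) (n : Nat) :
    pvBPrices secret (n : Int) = (pvS secret n, (List.range n).map (pvP secret)) := by
  induction n with
  | zero => simp [pvBPrices, PySem.List.pyRange_one_eq_nil le_rfl, pvS]
  | succ n ih =>
    have h0 : (0 : Int) ≤ (n : Int) := by omega
    unfold pvBPrices at ih ⊢
    rw [show ((n + 1 : Nat) : Int) = (n : Int) + 1 by push_cast; ring,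
      PySem.List.pyRange_one_succ_right h0, List.foldl_append, ih, List.range_succ]
    simp [pvS, pvP]

lemma pv_changes_eq (secret : Int) (n : Nat) :
    (((List.range n).map (pvP secret)).zip
        (PySem.Int.mod secret 10 ::
          PySem.List.slice ((List.range n).map (pvP secret)) none (some (-1)))).map
      (fun pq => pq.1 - pq.2) = (List.range n).map (pvC secret) := by
  rw [PySem.List.slice_to_neg_one]
  apply List.ext_getElem
  · simp
    omega
  · intro i h1 h2
    simp only [List.getElem_map, List.getElem_zip, List.getElem_range]
    rcases i with _ | j
    · simp [pvC, pvLast]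
    · have hj : j < (((List.range n).map (pvP secret)).dropLast).length := by
        simp at h1 ⊢
        omega
      simp only [List.getElem_cons_succ, List.getElem_dropLast, List.getElem_map,
        List.getElem_range]
      rfl

lemma pv_take_four_drop (secret : Int) (n j : Nat) (h : j + 4 ≤ n) :
    List.take 4 (List.drop j ((List.range n).map (pvC secret)))
      = [pvC secret j, pvC secret (j + 1), pvC secret (j + 2), pvC secret (j + 3)] := by
  apply List.ext_getElem
  · simp
    omega
  · intro i h1 h2
    simp only [List.getElem_take, List.getElem_drop, List.getElem_map, List.getElem_range]
    simp at h2
    interval_cases i <;> simp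

lemma pvB_dict (secret : Int) (n : Nat) :
    (PySem.List.enumerate ((List.range n).map (pvP secret))).foldl
      (pvBRecord ((List.range n).map (pvC secret))) PySem.Dict.empty = pvD secret n := by
  rw [PySem.List.enumerate_eq_map_pyRange ((List.range n).map (pvP secret)) 0]
  have hlen : PySem.List.len ((List.range n).map (pvP secret)) = (n : Int) := by simp
  rw [hlen, PySem.List.pyRange_zero_natCast, List.foldl_map, List.foldl_map]
  unfold pvD
  apply PySem.List.foldl_congr_mem
  intro acc k hk
  have hkn : k < n := List.mem_range.mp hk
  by_cases hk4 : 4 ≤ k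
  · have c1 : ((k : Int) - 3) = ((k - 3 : Nat) : Int) := by omega
    have c2 : ((k : Int) + 1) = ((k + 1 : Nat) : Int) := by omega
    have e : k + 1 - (k - 3) = 4 := by omega
    have e1 : k - 3 + 1 = k - 2 := by omega
    have e2 : k - 3 + 2 = k - 1 := by omega
    have e3 : k - 3 + 3 = k := by omega
    rw [pvBRecord, pvStep, if_pos (show (4 : Int) ≤ (k : Int) by exact_mod_cast hk4),
      if_pos hk4, c1, c2, PySem.List.slice_natCast, e,
      pv_take_four_drop secret n (k - 3) (by omega), e1, e2, e3,
      PySem.List.pyGetD_natCast]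
    rw [PySem.List.getD_map_range (pvP secret) n k 0 hkn]
  · rw [pvBRecord, pvStep, if_neg (show ¬ (4 : Int) ≤ (k : Int) by exact_mod_cast hk4),
      if_neg hk4]

-- ===== VERDICT (by name: the statement is the Claim_ definition above) =====
theorem generate_price_sequences_spec : Claim_equal_generate_price_sequences := by
  intro secret iterations _
  unfold Spec_generate_price_sequences
  by_cases h : iterations ≤ 0
  · simp [generate_price_sequences, generate_price_sequences_alt, pvBPrices,
      PySem.List.pyRange_one_eq_nil h]
  · push Not at h
    obtain ⟨n, rfl⟩ : ∃ n : Nat, iterations = (n : Int) := ⟨iterations.toNat, by omega⟩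
    simp only [generate_price_sequences, generate_price_sequences_alt,
      pvA_inv, pvB_prices, pv_changes_eq, pvB_dict]
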